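-- pv_equiv track=rewrite | github.com/idotal/polarcub | BinaryTrellis.py | removeDeletionGuardBands
-- ===== SOURCE A (Python) =====
-- def removeDeletionGuardBands(receivedWord, n, n0):
--     """Undo the addition of guard bands (plus trim), and return a list of the resulting substrings."""
--
--     trimmedReceivedWord = trimZerosAtEdges(receivedWord)
--
--     if n <= n0:
--         return [trimmedReceivedWord]
--     else:
--         leftHalfOfTrimmedReceivedWord = trimmedReceivedWord[0:len(trimmedReceivedWord)//2]
--         rightHalfOfTrimmedReceivedWord = trimmedReceivedWord[len(trimmedReceivedWord)//2:len(trimmedReceivedWord)]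
--
--         leftList = removeDeletionGuardBands(leftHalfOfTrimmedReceivedWord, n-1, n0)
--         rightList = removeDeletionGuardBands(rightHalfOfTrimmedReceivedWord,n-1,n0)
--
--         return leftList + rightList
--
-- def trimZerosAtEdges(receivedWord):
--         trimmedReceivedWord = []
--
--         firstOneIndex = -1
--
--         for i in range(len(receivedWord)):
--             if receivedWord[i] == 1:
--                 firstOneIndex = i
--                 break
--
--         if firstOneIndex == -1:
--             return trimmedReceivedWord # which is empty
--
--         lastOneIndex = -1
--         for i in range(len(receivedWord)-1,-1,-1):
--             if receivedWord[i] == 1: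
--                 lastOneIndex = i
--                 break
--
--         assert(lastOneIndex != -1)
--
--         for i in range(firstOneIndex, lastOneIndex+1):
--             trimmedReceivedWord.append(receivedWord[i])
--
--         return trimmedReceivedWord
-- ===== SOURCE B (Python) =====
-- def removeDeletionGuardBands(receivedWord, n, n0):
--     """Undo the addition of guard bands (plus trim), iteratively level by level."""
--     current = [receivedWord]
--     for _ in range(max(0, n - n0)):
--         nxt = []
--         for w in current:
--             t = trimZerosAtEdges(w)
--             h = len(t) // 2
--             nxt.append(t[:h])
--             nxt.append(t[h:])
--         current = nxt
--     return [trimZerosAtEdges(w) for w in current]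
--
-- def trimZerosAtEdges(receivedWord):
--         trimmedReceivedWord = []
--
--         firstOneIndex = -1
--
--         for i in range(len(receivedWord)):
--             if receivedWord[i] == 1:
--                 firstOneIndex = i
--                 break
--
--         if firstOneIndex == -1:
--             return trimmedReceivedWord # which is empty
--
--         lastOneIndex = -1
--         for i in range(len(receivedWord)-1,-1,-1):
--             if receivedWord[i] == 1:
--                 lastOneIndex = i
--                 break
--
--         assert(lastOneIndex != -1)
--
--         for i in range(firstOneIndex, lastOneIndex+1):
--             trimmedReceivedWord.append(receivedWord[i])
--
--         return trimmedReceivedWord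
-- ===== Notes on version B (the rewrite author's own statement) =====
-- stated objective: alternative
-- what changed: Replaced the binary recursion with an iterative breadth-first level expansion: a worklist is split max(0, n-n0) times and the leaves are trimmed once at the end.
import Mathlib
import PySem

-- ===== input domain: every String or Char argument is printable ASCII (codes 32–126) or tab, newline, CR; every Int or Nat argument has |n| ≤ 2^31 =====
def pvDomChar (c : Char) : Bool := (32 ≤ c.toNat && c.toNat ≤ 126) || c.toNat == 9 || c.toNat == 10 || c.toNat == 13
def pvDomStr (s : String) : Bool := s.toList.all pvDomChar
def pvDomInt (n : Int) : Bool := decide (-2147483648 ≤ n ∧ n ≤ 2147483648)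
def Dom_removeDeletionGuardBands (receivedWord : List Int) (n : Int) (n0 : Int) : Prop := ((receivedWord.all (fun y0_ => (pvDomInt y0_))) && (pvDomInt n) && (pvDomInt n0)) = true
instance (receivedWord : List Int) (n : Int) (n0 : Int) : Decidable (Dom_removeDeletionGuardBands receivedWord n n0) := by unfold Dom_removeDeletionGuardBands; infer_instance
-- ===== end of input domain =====

-- B replaces A's binary recursion by an iterative breadth-first level expansion
-- (split max(0, n-n0) times, then trim each leaf once); alternative decomposition, same cost.


-- ===== PORT A =====
-- helper: "for i in range(len(w)): if w[i] == 1: firstOneIndex = i; break"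
-- (structural scan returning the absolute index of the first 1, none if absent = firstOneIndex == -1)
def findFirstOne : List Int → Nat → Option Nat
  | [], _ => none
  | x :: xs, i => if x = 1 then some i else findFirstOne xs (i + 1)

-- helper: "for i in range(len(w)-1,-1,-1): if w[i] == 1: lastOneIndex = i; break"
-- (counts the index down; w.getD i 0 is exact since every probed index is in range)
def findLastOne (w : List Int) : Nat → Option Nat
  | 0 => none
  | i + 1 => if w.getD i 0 = 1 then some i else findLastOne w i

-- port of trimZerosAtEdges; the final append loop "for i in range(first, last+1)" is the map
-- over List.range' first (last+1-first); w.getD i 0 is exact since first ≤ i ≤ last < len.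
def trimZerosAtEdges (receivedWord : List Int) : List Int :=
  match findFirstOne receivedWord 0 with
  | none => []
  | some firstOneIndex =>
    match findLastOne receivedWord receivedWord.length with
    | none => []  -- unreachable (the Python assert)
    | some lastOneIndex =>
      (List.range' firstOneIndex (lastOneIndex + 1 - firstOneIndex)).map
        (fun i => receivedWord.getD i 0)

-- slices t[0:len//2] and t[len//2:len] are take/drop: exact since 0 ≤ len//2 ≤ len
def removeDeletionGuardBands (receivedWord : List Int) (n : Int) (n0 : Int) : List (List Int) :=
  let t := trimZerosAtEdges receivedWord
  if n ≤ n0 then [t]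
  else
    removeDeletionGuardBands (t.take (t.length / 2)) (n - 1) n0 ++
    removeDeletionGuardBands (t.drop (t.length / 2)) (n - 1) n0
termination_by (n - n0).toNat
decreasing_by all_goals omega

-- ===== PORT B =====
-- one pass of Source B's inner loop: trim each word and append its two halves
def expandOnce (ws : List (List Int)) : List (List Int) :=
  ws.flatMap (fun w =>
    let t := trimZerosAtEdges w
    [t.take (t.length / 2), t.drop (t.length / 2)])

-- "for _ in range(max(0, n-n0)):" as a counter recursion
def expandLevels : Nat → List (List Int) → List (List Int)
  | 0, ws => ws
  | k + 1, ws => expandLevels k (expandOnce ws)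

def removeDeletionGuardBands_alt (receivedWord : List Int) (n : Int) (n0 : Int) : List (List Int) :=
  (expandLevels (n - n0).toNat [receivedWord]).map trimZerosAtEdges

-- ===== PRECONDITION & SPEC =====
-- Pre_ excludes inputs with n - n0 > 900: there A's recursion descends to depth n - n0 and
-- hits Python's default recursion limit, raising RecursionError instead of returning.
def Pre_removeDeletionGuardBands (receivedWord : List Int) (n : Int) (n0 : Int) : Prop :=
  n - n0 <= 900
instance (receivedWord : List Int) (n : Int) (n0 : Int) : Decidable (Pre_removeDeletionGuardBands receivedWord n n0) := by unfold Pre_removeDeletionGuardBands; infer_instance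
def pvWitness_removeDeletionGuardBands : List Int × Int × Int := ([1, 0, 1], 2, 0)

def Spec_removeDeletionGuardBands (receivedWord : List Int) (n : Int) (n0 : Int) (out : List (List Int)) : Prop := out = removeDeletionGuardBands_alt receivedWord n n0
instance (receivedWord : List Int) (n : Int) (n0 : Int) (out : List (List Int)) : Decidable (Spec_removeDeletionGuardBands receivedWord n n0 out) := by unfold Spec_removeDeletionGuardBands; infer_instance

-- ===== CLAIM (what is proved, stated in full; the proofs are below) =====
def Claim_equal_removeDeletionGuardBands : Prop := ∀ (receivedWord : List Int) (n : Int) (n0 : Int), Dom_removeDeletionGuardBands receivedWord n n0 → Pre_removeDeletionGuardBands receivedWord n n0 → Spec_removeDeletionGuardBands receivedWord n n0 (removeDeletionGuardBands receivedWord n n0)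

-- ===== LEMMAS AND PROOFS =====
theorem expandOnce_append (a b : List (List Int)) :
    expandOnce (a ++ b) = expandOnce a ++ expandOnce b := by
  simp [expandOnce]

theorem expandLevels_append (k : Nat) (a b : List (List Int)) :
    expandLevels k (a ++ b) = expandLevels k a ++ expandLevels k b := by
  induction k generalizing a b with
  | zero => rfl
  | succ k ih => simp [expandLevels, expandOnce_append, ih]

theorem main_lemma (k : Nat) : ∀ (w : List Int) (n n0 : Int), (n - n0).toNat = k →
    removeDeletionGuardBands w n n0 = (expandLevels k [w]).map trimZerosAtEdges := by
  induction k with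
  | zero =>
    intro w n n0 hk
    have hle : n ≤ n0 := by omega
    rw [removeDeletionGuardBands]
    simp [hle, expandLevels]
  | succ k ih =>
    intro w n n0 hk
    have hgt : ¬ n ≤ n0 := by omega
    have hk' : (n - 1 - n0).toNat = k := by omega
    rw [removeDeletionGuardBands]
    simp only [hgt, if_false]
    rw [ih _ _ _ hk', ih _ _ _ hk']
    have : expandOnce [w] =
        [(trimZerosAtEdges w).take ((trimZerosAtEdges w).length / 2)] ++
        [(trimZerosAtEdges w).drop ((trimZerosAtEdges w).length / 2)] := by
      simp [expandOnce]
    simp only [expandLevels, this, expandLevels_append, List.map_append]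

-- ===== VERDICT (by name: the statement is the Claim_ definition above) =====
theorem removeDeletionGuardBands_spec : Claim_equal_removeDeletionGuardBands := by
  intro w n n0 _ _
  unfold Spec_removeDeletionGuardBands removeDeletionGuardBands_alt
  exact main_lemma _ w n n0 rfl
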